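-- pv_equiv track=rewrite | github.com/umairjavaid/FlutterSwarm_original | python-backend/src/agents/architecture_agent.py | _generate_architecture_analysis
-- ===== SOURCE A (Python) =====
-- from typing import Any, Dict, List, Optional
--
-- def _generate_architecture_analysis(features: List[str]) -> str:
--     """Generate detailed architecture analysis for each feature."""
--     if not features:
--         return "- Basic mobile app: Simple navigation, basic UI components, minimal state management"
--
--     feature_analysis = []
--
--     for feature in features:
--         if "photo" in feature.lower() or "image" in feature.lower():
--             feature_analysis.append("- Photo sharing: Image processing, file upload, local caching, gallery management")
--         elif "auth" in feature.lower() or "login" in feature.lower():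
--             feature_analysis.append("- Authentication: Secure token management, user session handling, form validation")
--         elif "social" in feature.lower() or "chat" in feature.lower() or "messag" in feature.lower():
--             feature_analysis.append("- Social features: Real-time communication, user management, notification system")
--         elif "music" in feature.lower() or "audio" in feature.lower():
--             feature_analysis.append("- Music player: Audio streaming, playlist management, background playback")
--         elif "ecommerce" in feature.lower() or "shop" in feature.lower():
--             feature_analysis.append("- E-commerce: Product catalog, shopping cart state, payment integration")
--         elif "weather" in feature.lower():
--             feature_analysis.append("- Weather app: Location services, API integration, data caching")
--         else:
--             feature_analysis.append(f"- {feature}: Comprehensive analysis and planning for {feature}")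
--
--     return "\n".join(feature_analysis)
-- ===== SOURCE B (Python) =====
-- _RULES = [
--     (("photo", "image"), "- Photo sharing: Image processing, file upload, local caching, gallery management"),
--     (("auth", "login"), "- Authentication: Secure token management, user session handling, form validation"),
--     (("social", "chat", "messag"), "- Social features: Real-time communication, user management, notification system"),
--     (("music", "audio"), "- Music player: Audio streaming, playlist management, background playback"),
--     (("ecommerce", "shop"), "- E-commerce: Product catalog, shopping cart state, payment integration"),
--     (("weather",), "- Weather app: Location services, API integration, data caching"),
-- ]
--
--
-- def _generate_architecture_analysis(features):
--     if not features:
--         return "- Basic mobile app: Simple navigation, basic UI components, minimal state management"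
--     # Inverted traversal: iterate rules (in priority order) in the OUTER loop,
--     # claiming still-unassigned features; unclaimed features get the default line.
--     lows = [f.lower() for f in features]
--     assigned = [None] * len(features)
--     for kws, desc in _RULES:
--         for j, low in enumerate(lows):
--             if assigned[j] is None and any(k in low for k in kws):
--                 assigned[j] = desc
--     lines = [d if d is not None
--              else f"- {f}: Comprehensive analysis and planning for {f}"
--              for f, d in zip(features, assigned)]
--     return "\n".join(lines)
-- ===== Notes on version B (the rewrite author's own statement) =====
-- stated objective: alternative
-- what changed: Inverted the traversal: instead of A's per-feature if/elif keyword chain, B makes one pass per rule in priority order over an assignment array, each rule claiming the still-unassigned features whose lowercased text contains one of its keywords, then fills defaults and joins.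
import Mathlib
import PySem

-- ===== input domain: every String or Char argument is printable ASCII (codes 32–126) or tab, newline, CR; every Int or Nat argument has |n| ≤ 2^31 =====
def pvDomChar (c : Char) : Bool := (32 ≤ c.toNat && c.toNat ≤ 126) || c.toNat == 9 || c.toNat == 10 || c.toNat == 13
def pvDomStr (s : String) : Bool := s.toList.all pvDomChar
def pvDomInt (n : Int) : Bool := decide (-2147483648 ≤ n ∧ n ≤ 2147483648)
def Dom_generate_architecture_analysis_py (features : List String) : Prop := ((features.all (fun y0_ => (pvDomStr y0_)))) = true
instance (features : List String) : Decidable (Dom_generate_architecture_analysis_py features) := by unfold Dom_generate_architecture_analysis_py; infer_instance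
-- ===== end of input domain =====

-- B inverts the traversal: an outer loop over the ordered rules claims still-unassigned features
-- in an assignment array, instead of A's per-feature if/elif chain; same return value, no speed claim.

-- ===== PORT A =====
-- literal transliteration of A: per-feature if/elif chain, list built by appending in a loop
def generate_architecture_analysis_py (features : List String) : String :=
  if features = [] then
    "- Basic mobile app: Simple navigation, basic UI components, minimal state management"
  else
    let feature_analysis := features.foldl (fun acc feature =>
      if PySem.Str.isIn "photo" (PySem.Str.lower feature) || PySem.Str.isIn "image" (PySem.Str.lower feature) then
        acc ++ ["- Photo sharing: Image processing, file upload, local caching, gallery management"]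
      else if PySem.Str.isIn "auth" (PySem.Str.lower feature) || PySem.Str.isIn "login" (PySem.Str.lower feature) then
        acc ++ ["- Authentication: Secure token management, user session handling, form validation"]
      else if PySem.Str.isIn "social" (PySem.Str.lower feature) || PySem.Str.isIn "chat" (PySem.Str.lower feature) || PySem.Str.isIn "messag" (PySem.Str.lower feature) then
        acc ++ ["- Social features: Real-time communication, user management, notification system"]
      else if PySem.Str.isIn "music" (PySem.Str.lower feature) || PySem.Str.isIn "audio" (PySem.Str.lower feature) then
        acc ++ ["- Music player: Audio streaming, playlist management, background playback"]
      else if PySem.Str.isIn "ecommerce" (PySem.Str.lower feature) || PySem.Str.isIn "shop" (PySem.Str.lower feature) then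
        acc ++ ["- E-commerce: Product catalog, shopping cart state, payment integration"]
      else if PySem.Str.isIn "weather" (PySem.Str.lower feature) then
        acc ++ ["- Weather app: Location services, API integration, data caching"]
      else
        acc ++ ["- " ++ feature ++ ": Comprehensive analysis and planning for " ++ feature]) []
    PySem.Str.join "\n" feature_analysis

-- ===== PORT B =====
-- B's ordered rules table: (keyword substrings, canned description)
def pvRules : List (List String × String) :=
  [ (["photo", "image"], "- Photo sharing: Image processing, file upload, local caching, gallery management"),
    (["auth", "login"], "- Authentication: Secure token management, user session handling, form validation"),
    (["social", "chat", "messag"], "- Social features: Real-time communication, user management, notification system"),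
    (["music", "audio"], "- Music player: Audio streaming, playlist management, background playback"),
    (["ecommerce", "shop"], "- E-commerce: Product catalog, shopping cart state, payment integration"),
    (["weather"], "- Weather app: Location services, API integration, data caching") ]

-- one rule pass of B's inner loop: claim each still-unassigned slot whose lowercased feature matches
def pvRulePass (rule : List String × String) (asg : List (Option String)) (lows : List String) : List (Option String) :=
  (asg.zip lows).map (fun p =>
    match p.1 with
    | some d => some d
    | none => if rule.1.any (fun k => PySem.Str.isIn k p.2) then some rule.2 else none)

def generate_architecture_analysis_py_alt (features : List String) : String :=
  if features = [] then
    "- Basic mobile app: Simple navigation, basic UI components, minimal state management"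
  else
    let lows := features.map PySem.Str.lower
    let assigned : List (Option String) := features.map (fun _ => none)
    let assigned := pvRules.foldl (fun asg rule => pvRulePass rule asg lows) assigned
    let lines := (features.zip assigned).map (fun p =>
      match p.2 with
      | some d => d
      | none => "- " ++ p.1 ++ ": Comprehensive analysis and planning for " ++ p.1)
    PySem.Str.join "\n" lines

-- ===== PRECONDITION & SPEC =====
def Spec_generate_architecture_analysis_py (features : List String) (out : String) : Prop := out = generate_architecture_analysis_py_alt features
instance (features : List String) (out : String) : Decidable (Spec_generate_architecture_analysis_py features out) := by unfold Spec_generate_architecture_analysis_py; infer_instance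

-- ===== CLAIM (what is proved, stated in full; the proofs are below) =====
def Claim_equal_generate_architecture_analysis_py : Prop := ∀ (features : List String), Dom_generate_architecture_analysis_py features → Spec_generate_architecture_analysis_py features (generate_architecture_analysis_py features)

-- ===== LEMMAS AND PROOFS =====

/-- The rule-major fold acts pointwise, so it commutes with the per-feature view. -/
theorem foldl_rulePass_map (rules : List (List String × String)) (fs : List String)
    (g : String → Option String) :
    rules.foldl (fun asg rule => pvRulePass rule asg (fs.map PySem.Str.lower)) (fs.map g)
      = fs.map (fun f => rules.foldl (fun o rule =>
          match o with
          | some d => some d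
          | none => if rule.1.any (fun k => PySem.Str.isIn k (PySem.Str.lower f)) then some rule.2 else none) (g f)) := by
  induction rules generalizing g with
  | nil => simp
  | cons r rs ih =>
    simp only [List.foldl_cons]
    have h1 : pvRulePass r (fs.map g) (fs.map PySem.Str.lower)
        = fs.map (fun f =>
            match g f with
            | some d => some d
            | none => if r.1.any (fun k => PySem.Str.isIn k (PySem.Str.lower f)) then some r.2 else none) := by
      simp [pvRulePass, List.zip_map', List.map_map, Function.comp]
    rw [h1, ih]

/-- Per feature, the keep-first fold over B's rules equals A's if/elif chain output. -/
theorem perFeature_eq (f : String) :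
    (match pvRules.foldl (fun o rule =>
        match o with
        | some d => some d
        | none => if rule.1.any (fun k => PySem.Str.isIn k (PySem.Str.lower f)) then some rule.2 else none)
        (none : Option String) with
     | some d => d
     | none => "- " ++ f ++ ": Comprehensive analysis and planning for " ++ f)
    = (if PySem.Str.isIn "photo" (PySem.Str.lower f) || PySem.Str.isIn "image" (PySem.Str.lower f) then
        "- Photo sharing: Image processing, file upload, local caching, gallery management"
      else if PySem.Str.isIn "auth" (PySem.Str.lower f) || PySem.Str.isIn "login" (PySem.Str.lower f) then
        "- Authentication: Secure token management, user session handling, form validation"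
      else if PySem.Str.isIn "social" (PySem.Str.lower f) || PySem.Str.isIn "chat" (PySem.Str.lower f) || PySem.Str.isIn "messag" (PySem.Str.lower f) then
        "- Social features: Real-time communication, user management, notification system"
      else if PySem.Str.isIn "music" (PySem.Str.lower f) || PySem.Str.isIn "audio" (PySem.Str.lower f) then
        "- Music player: Audio streaming, playlist management, background playback"
      else if PySem.Str.isIn "ecommerce" (PySem.Str.lower f) || PySem.Str.isIn "shop" (PySem.Str.lower f) then
        "- E-commerce: Product catalog, shopping cart state, payment integration"
      else if PySem.Str.isIn "weather" (PySem.Str.lower f) then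
        "- Weather app: Location services, API integration, data caching"
      else
        "- " ++ f ++ ": Comprehensive analysis and planning for " ++ f) := by
  unfold pvRules
  simp only [List.foldl_cons, List.foldl_nil, List.any_cons, List.any_nil, Bool.or_false]
  cases h1 : (PySem.Str.isIn "photo" (PySem.Str.lower f) || PySem.Str.isIn "image" (PySem.Str.lower f)) <;>
  cases h2 : (PySem.Str.isIn "auth" (PySem.Str.lower f) || PySem.Str.isIn "login" (PySem.Str.lower f)) <;>
  cases h3 : (PySem.Str.isIn "social" (PySem.Str.lower f) || (PySem.Str.isIn "chat" (PySem.Str.lower f) || PySem.Str.isIn "messag" (PySem.Str.lower f))) <;>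
  cases h4 : (PySem.Str.isIn "music" (PySem.Str.lower f) || PySem.Str.isIn "audio" (PySem.Str.lower f)) <;>
  cases h5 : (PySem.Str.isIn "ecommerce" (PySem.Str.lower f) || PySem.Str.isIn "shop" (PySem.Str.lower f)) <;>
  cases h6 : (PySem.Str.isIn "weather" (PySem.Str.lower f)) <;>
    simp_all [Bool.or_assoc]

/-- The append-accumulator foldl equals mapping the per-feature function. -/
theorem foldl_append_eq_map (f : String → String) (xs : List String) (acc : List String)
    (g : List String → String → List String)
    (hg : ∀ a x, g a x = a ++ [f x]) :
    xs.foldl g acc = acc ++ xs.map f := by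
  induction xs generalizing acc with
  | nil => simp
  | cons x xs ih => simp [List.foldl, hg, ih]

/-- zipping a list with itself is mapping the diagonal. -/
theorem zip_self_eq_map (xs : List String) : xs.zip xs = xs.map (fun x => (x, x)) := by
  induction xs with
  | nil => rfl
  | cons x xs ih => simp [List.zip]

-- ===== VERDICT (by name: the statement is the Claim_ definition above) =====
theorem generate_architecture_analysis_py_spec : Claim_equal_generate_architecture_analysis_py := by
  intro features _
  unfold Spec_generate_architecture_analysis_py generate_architecture_analysis_py generate_architecture_analysis_py_alt
  by_cases h : features = []
  · simp [h]
  · simp only [h, if_false]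
    congr 1
    rw [foldl_rulePass_map pvRules features (fun _ => none), List.zip_map_right, List.map_map]
    refine foldl_append_eq_map
      (fun f => (if PySem.Str.isIn "photo" (PySem.Str.lower f) || PySem.Str.isIn "image" (PySem.Str.lower f) then
        "- Photo sharing: Image processing, file upload, local caching, gallery management"
      else if PySem.Str.isIn "auth" (PySem.Str.lower f) || PySem.Str.isIn "login" (PySem.Str.lower f) then
        "- Authentication: Secure token management, user session handling, form validation"
      else if PySem.Str.isIn "social" (PySem.Str.lower f) || PySem.Str.isIn "chat" (PySem.Str.lower f) || PySem.Str.isIn "messag" (PySem.Str.lower f) then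
        "- Social features: Real-time communication, user management, notification system"
      else if PySem.Str.isIn "music" (PySem.Str.lower f) || PySem.Str.isIn "audio" (PySem.Str.lower f) then
        "- Music player: Audio streaming, playlist management, background playback"
      else if PySem.Str.isIn "ecommerce" (PySem.Str.lower f) || PySem.Str.isIn "shop" (PySem.Str.lower f) then
        "- E-commerce: Product catalog, shopping cart state, payment integration"
      else if PySem.Str.isIn "weather" (PySem.Str.lower f) then
        "- Weather app: Location services, API integration, data caching"
      else
        "- " ++ f ++ ": Comprehensive analysis and planning for " ++ f)) features [] _ ?_ |>.trans ?_
    · intro a x; dsimp only; split_ifs <;> rfl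
    · simp only [List.nil_append]
      rw [zip_self_eq_map features, List.map_map]
      apply List.map_congr_left
      intro f _
      exact (perFeature_eq f).symm
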